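/- GENERATED by tools/from_farm_form.py from prooffarm-gif/accepted/DGifGetCodeNext.2/Proof.lean (a worked proof of the farm's unit `DGifGetCodeNext.2`,
   accepted by the verdict) — do not edit. -/
import Gif.Spec.Units.DGifGetCodeNext_2
import Gif.Spec.AllSegs
import Gif.Spec.Proved.DGifGetCodeNext_2_Lemmas

open X86 X86.User Asan ProgX.Base ProgX.Base.Spec Gif.Spec

/-!
  `DGifGetCodeNext.2` (0x109fe3 … 0x10a086, 37 instructions; dgif_lib.c:791-807): A BODY SEGMENT OF A PROTECTED FUNCTION WITH A
  CALL IN THE MIDDLE. The return address 0x10a05c (`ret9`) of `InternalRead(gif, pv.Buf + 1, n)` is not a cut of the design, so the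
  unit makes it one of its own: the private assertion `cn2_AtRet9` (`Body` + the result so far + `*CodeBlock = &pv.Buf`) and two
  walks (Lemmas.lean), chained here.
-/

/-- Segment 2 of `DGifGetCodeNext` takes `AfterLen` at 0x109fe3 to `Done` at 0x109fc6. -/
theorem Gif.Spec.Proved.DGifGetCodeNext_2_ok : Gif.Spec.DGifGetCodeNext_2.Statement := by
  intro Lay hLay μ hμ u₀ hcode h_InternalRead h_asan_store8_noabort h_asan_store1_noabort h_asan_store4_noabort
  intro H rest frames F R e ret v hat
  -- the callee's contract for the frame list of the body (the own frame in front), for every byte count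
  have hir := h_InternalRead H rest (DGifGetCodeNext.framesIn frames e) F R
  -- 0x109fe3 … 0x109fc6 (the terminator arm), or … the call … 0x10a05c (the data arm)
  refine (Gif.Spec.DGifGetCodeNext_2.cn2_seg_head Lay hLay μ hμ u₀ hcode H rest frames F R e ret hir h_asan_store8_noabort
    h_asan_store1_noabort v hat).trans ?_
  intro v1 hv1
  rcases hv1 with hdone | hret9
  · -- the terminator arm is at the exit already
    exact ReachVia.done hdone
  · -- 0x10a05c … 0x109fc6
    exact Gif.Spec.DGifGetCodeNext_2.cn2_seg_tail Lay hLay μ hμ u₀ hcode H rest frames F R e ret h_asan_store4_noabort v1 hret9
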